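-- pv_equiv track=rewrite | github.com/tosbaha/reverse | ctf/flareon 2025/06/solution.py | recover_modulus
-- ===== SOURCE A (Python) =====
-- import math
--
-- def recover_modulus(xs):
--     # xs: consecutive integer outputs x0,x1,x2,...
--     if len(xs) < 4:
--         raise ValueError("Need >=4 consecutive outputs")
--     t = [ (xs[i+1] - xs[i]) for i in range(len(xs)-1) ]
--     us = []
--     for i in range(len(t)-2):
--         u = t[i+2]*t[i] - t[i+1]*t[i+1]
--         us.append(abs(u))
--     g = 0
--     for u in us:
--         g = math.gcd(g, u)
--     return g
-- ===== SOURCE B (Python) =====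
-- import math
--
-- def recover_modulus(xs):
--     # Divide and conquer: recursively split the index range in half and
--     # combine the gcds of the two halves; each window determinant is read
--     # directly from xs. Correct because gcd is associative and commutative.
--     if len(xs) < 4:
--         raise ValueError("Need >=4 consecutive outputs")
--     def det(i):
--         return abs((xs[i+3] - xs[i+2]) * (xs[i+1] - xs[i])
--                    - (xs[i+2] - xs[i+1]) * (xs[i+2] - xs[i+1]))
--     def g(lo, hi):
--         if hi - lo <= 1:
--             return det(lo)
--         mid = (lo + hi) // 2
--         return math.gcd(g(lo, mid), g(mid, hi))
--     return g(0, len(xs) - 3)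
-- ===== Notes on version B (the rewrite author's own statement) =====
-- stated objective: alternative
-- what changed: B replaces A's build-difference-list / build-determinant-list / linear left gcd fold with a recursive divide-and-conquer over the index range: each window determinant is computed directly from xs and halves are combined with gcd, which is correct since gcd is associative and commutative with identity 0.
import Mathlib
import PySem

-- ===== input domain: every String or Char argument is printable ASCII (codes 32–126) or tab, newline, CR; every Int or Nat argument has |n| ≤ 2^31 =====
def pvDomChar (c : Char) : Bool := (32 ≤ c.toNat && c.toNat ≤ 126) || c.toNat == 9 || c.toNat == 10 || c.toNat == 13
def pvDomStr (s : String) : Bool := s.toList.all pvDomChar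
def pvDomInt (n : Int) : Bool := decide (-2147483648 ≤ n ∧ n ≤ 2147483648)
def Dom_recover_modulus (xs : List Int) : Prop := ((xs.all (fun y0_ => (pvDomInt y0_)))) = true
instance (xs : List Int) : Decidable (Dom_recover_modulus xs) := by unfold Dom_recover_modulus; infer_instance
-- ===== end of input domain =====

-- B replaces A's staged lists + linear gcd fold by a recursive divide-and-conquer
-- over the index range (gcd is associative and commutative); objective: alternative.

-- ===== PORT A =====
def recover_modulus (xs : List Int) : Int :=
  let t := (PySem.List.pyRange 0 ((xs.length : Int) - 1) 1).map
    (fun i => PySem.List.pyGetD xs (i + 1) 0 - PySem.List.pyGetD xs i 0)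
  let us := (PySem.List.pyRange 0 ((t.length : Int) - 2) 1).foldl
    (fun acc i =>
      acc ++ [|PySem.List.pyGetD t (i + 2) 0 * PySem.List.pyGetD t i 0 -
               PySem.List.pyGetD t (i + 1) 0 * PySem.List.pyGetD t (i + 1) 0|]) []
  us.foldl (fun g u => (Int.gcd g u : Int)) 0

-- ===== PORT B =====
-- helper det(i) of Source B: the window determinant read directly from xs
def pvDet (xs : List Int) (i : Int) : Int :=
  |(PySem.List.pyGetD xs (i + 3) 0 - PySem.List.pyGetD xs (i + 2) 0) *
     (PySem.List.pyGetD xs (i + 1) 0 - PySem.List.pyGetD xs i 0) -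
   (PySem.List.pyGetD xs (i + 2) 0 - PySem.List.pyGetD xs (i + 1) 0) *
     (PySem.List.pyGetD xs (i + 2) 0 - PySem.List.pyGetD xs (i + 1) 0)|

-- helper g(lo, hi) of Source B: divide-and-conquer gcd of det over [lo, hi)
def pvDcg (xs : List Int) (lo hi : Int) : Int :=
  if hi - lo ≤ 1 then pvDet xs lo
  else
    let mid := PySem.Int.floordiv (lo + hi) 2
    (Int.gcd (pvDcg xs lo mid) (pvDcg xs mid hi) : Int)
termination_by (hi - lo).toNat
decreasing_by
  · have h2 : PySem.Int.floordiv (lo + hi) 2 = (lo + hi) / 2 := by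
      simp [PySem.Int.floordiv, Int.fdiv_eq_ediv]
    rw [h2]; omega
  · have h2 : PySem.Int.floordiv (lo + hi) 2 = (lo + hi) / 2 := by
      simp [PySem.Int.floordiv, Int.fdiv_eq_ediv]
    rw [h2]; omega

def recover_modulus_alt (xs : List Int) : Int :=
  pvDcg xs 0 ((xs.length : Int) - 3)

-- ===== PRECONDITION & SPEC =====
-- A raises ValueError when len(xs) < 4; B raises there too, so those inputs lie outside Pre_.
def Pre_recover_modulus (xs : List Int) : Prop := 4 ≤ xs.length
instance (xs : List Int) : Decidable (Pre_recover_modulus xs) := by unfold Pre_recover_modulus; infer_instance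
def pvWitness_recover_modulus : List Int := [3, 1, 4, 1, 5]

def Spec_recover_modulus (xs : List Int) (out : Int) : Prop := out = recover_modulus_alt xs
instance (xs : List Int) (out : Int) : Decidable (Spec_recover_modulus xs out) := by unfold Spec_recover_modulus; infer_instance

-- ===== CLAIM (what is proved, stated in full; the proofs are below) =====
def Claim_equal_recover_modulus : Prop := ∀ (xs : List Int), Dom_recover_modulus xs → Pre_recover_modulus xs → Spec_recover_modulus xs (recover_modulus xs)

-- ===== LEMMAS AND PROOFS =====

-- gcd associativity on Int through the Nat coercions our folds use
lemma gcd_cast_assoc (g a b : Int) :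
    (Int.gcd ((Int.gcd g a : Nat) : Int) b : Int) = (Int.gcd g ((Int.gcd a b : Nat) : Int) : Int) := by
  simp [Int.gcd, Nat.gcd_assoc]

-- Folding gcd of pvDet over a nonempty index range from init g0 is gcd g0 (pvDcg lo hi).
lemma foldl_eq_gcd_dcg (xs : List Int) :
    ∀ (n : Nat) (lo hi : Int), hi - lo = (n : Int) → lo < hi → ∀ (g0 : Int),
      (PySem.List.pyRange lo hi 1).foldl (fun g i => (Int.gcd g (pvDet xs i) : Int)) g0 =
      (Int.gcd g0 (pvDcg xs lo hi) : Int) := by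
  intro n
  induction n using Nat.strong_induction_on with
  | _ n ih =>
    intro lo hi hn hlt g0
    rw [pvDcg]
    by_cases hbase : hi - lo ≤ 1
    · have hhi : hi = lo + 1 := by omega
      subst hhi
      rw [PySem.List.pyRange_one_singleton]
      simp
    · have hmid : PySem.Int.floordiv (lo + hi) 2 = (lo + hi) / 2 := by
        simp [PySem.Int.floordiv, Int.fdiv_eq_ediv]
      simp only [if_neg hbase, hmid]
      set mid := (lo + hi) / 2 with hm
      have h1 : lo < mid := by omega
      have h2 : mid < hi := by omega
      rw [PySem.List.pyRange_one_append lo mid hi (le_of_lt h1) (le_of_lt h2),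
          List.foldl_append]
      rw [ih (mid - lo).toNat (by omega) lo mid (by omega) h1 g0]
      rw [ih (hi - mid).toNat (by omega) mid hi (by omega) h2 _]
      exact gcd_cast_assoc g0 (pvDcg xs lo mid) (pvDcg xs mid hi)

-- pvDcg is nonnegative (it is an |·| or a cast gcd)
lemma pvDcg_nonneg (xs : List Int) (lo hi : Int) : 0 ≤ pvDcg xs lo hi := by
  rw [pvDcg]
  split_ifs
  · exact abs_nonneg _
  · exact Int.natCast_nonneg _

-- The i-th |determinant| A computes from its difference list t equals pvDet xs i.
lemma body_eq (xs : List Int) (i : Int)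
    (hi : i ∈ PySem.List.pyRange 0 ((xs.length : Int) - 3) 1) :
    |PySem.List.pyGetD ((PySem.List.pyRange 0 ((xs.length : Int) - 1) 1).map
        (fun j => PySem.List.pyGetD xs (j + 1) 0 - PySem.List.pyGetD xs j 0)) (i + 2) 0 *
      PySem.List.pyGetD ((PySem.List.pyRange 0 ((xs.length : Int) - 1) 1).map
        (fun j => PySem.List.pyGetD xs (j + 1) 0 - PySem.List.pyGetD xs j 0)) i 0 -
      PySem.List.pyGetD ((PySem.List.pyRange 0 ((xs.length : Int) - 1) 1).map
        (fun j => PySem.List.pyGetD xs (j + 1) 0 - PySem.List.pyGetD xs j 0)) (i + 1) 0 *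
      PySem.List.pyGetD ((PySem.List.pyRange 0 ((xs.length : Int) - 1) 1).map
        (fun j => PySem.List.pyGetD xs (j + 1) 0 - PySem.List.pyGetD xs j 0)) (i + 1) 0| =
    pvDet xs i := by
  rw [PySem.List.mem_pyRange_one] at hi
  unfold pvDet
  rw [PySem.List.pyGetD_map_pyRange_of_nonneg _ _ _ _ (by omega) (by omega),
      PySem.List.pyGetD_map_pyRange_of_nonneg _ _ _ _ (by omega) (by omega),
      PySem.List.pyGetD_map_pyRange_of_nonneg _ _ _ _ (by omega) (by omega)]
  have h1 : i + 2 + 1 = i + 3 := by ring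
  have h2 : i + 1 + 1 = i + 2 := by ring
  rw [h1, h2]

-- ===== VERDICT (by name: the statement is the Claim_ definition above) =====
theorem recover_modulus_spec : Claim_equal_recover_modulus := by
  intro xs _ hpre
  unfold Spec_recover_modulus recover_modulus recover_modulus_alt
  simp only []
  have hpre' : 4 ≤ xs.length := hpre
  have hlen : (((PySem.List.pyRange 0 ((xs.length : Int) - 1) 1).map
      (fun j => PySem.List.pyGetD xs (j + 1) 0 - PySem.List.pyGetD xs j 0)).length : Int) - 2
      = (xs.length : Int) - 3 := by
    rw [List.length_map, PySem.List.length_pyRange_one]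
    omega
  rw [hlen, PySem.List.foldl_append_singleton_eq_map, List.nil_append, List.foldl_map]
  have hcong : (PySem.List.pyRange 0 ((xs.length : Int) - 3) 1).foldl
      (fun g i => (Int.gcd g
        |PySem.List.pyGetD ((PySem.List.pyRange 0 ((xs.length : Int) - 1) 1).map
            (fun j => PySem.List.pyGetD xs (j + 1) 0 - PySem.List.pyGetD xs j 0)) (i + 2) 0 *
          PySem.List.pyGetD ((PySem.List.pyRange 0 ((xs.length : Int) - 1) 1).map
            (fun j => PySem.List.pyGetD xs (j + 1) 0 - PySem.List.pyGetD xs j 0)) i 0 -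
          PySem.List.pyGetD ((PySem.List.pyRange 0 ((xs.length : Int) - 1) 1).map
            (fun j => PySem.List.pyGetD xs (j + 1) 0 - PySem.List.pyGetD xs j 0)) (i + 1) 0 *
          PySem.List.pyGetD ((PySem.List.pyRange 0 ((xs.length : Int) - 1) 1).map
            (fun j => PySem.List.pyGetD xs (j + 1) 0 - PySem.List.pyGetD xs j 0)) (i + 1) 0| : Int)) 0 =
      (PySem.List.pyRange 0 ((xs.length : Int) - 3) 1).foldl
        (fun g i => (Int.gcd g (pvDet xs i) : Int)) 0 := by
    apply PySem.List.foldl_congr_mem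
    intro g i hi
    rw [body_eq xs i hi]
  rw [hcong]
  rw [foldl_eq_gcd_dcg xs ((xs.length : Int) - 3).toNat 0 ((xs.length : Int) - 3)
    (by omega) (by omega) 0]
  have h0 := pvDcg_nonneg xs 0 ((xs.length : Int) - 3)
  simp [Int.gcd]
  exact h0
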